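-- pv_equiv track=rewrite | github.com/vasanthV127/Text-Anything2 | Test2/process_leaderboard.py | col_letter_range
-- ===== SOURCE A (Python) =====
-- from typing import List, Dict, Optional, Any
--
-- def col_letter_range(start: str, end: str) -> List[str]:
--     """Return list of column letters from start to end (inclusive)."""
--     def to_index(col: str) -> int:
--         res = 0
--         for ch in col:
--             res = res * 26 + (ord(ch) - 64)
--         return res
--
--     def to_letter(idx: int) -> str:
--         out = ''
--         while idx > 0:
--             idx, rem = divmod(idx - 1, 26)
--             out = chr(65 + rem) + out
--         return out
--
--     return [to_letter(i) for i in range(to_index(start), to_index(end) + 1)]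
-- ===== SOURCE B (Python) =====
-- from typing import List
--
--
-- def col_letter_range(start: str, end: str) -> List[str]:
--     """Return list of column letters from start to end (inclusive).
--
--     Odometer approach: decode the start column once, then advance the
--     current column string with a carry-style increment for each step
--     instead of re-deriving every letter from its index."""
--     def to_index(col: str) -> int:
--         # bijective base-26 value: 'A' is digit 1, ..., 'Z' is digit 26
--         return sum((ord(ch) - 64) * 26 ** i for i, ch in enumerate(reversed(col)))
--
--     def to_letter(idx: int) -> str:
--         if idx <= 0:
--             return ''
--         return to_letter((idx - 1) // 26) + chr(65 + (idx - 1) % 26)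
--
--     def inc(col: str) -> str:
--         cs = list(col)
--         i = len(cs) - 1
--         while i >= 0:
--             if cs[i] == 'Z':
--                 cs[i] = 'A'
--                 i -= 1
--             else:
--                 cs[i] = chr(ord(cs[i]) + 1)
--                 return ''.join(cs)
--         return 'A' + ''.join(cs)
--
--     s = to_index(start)
--     e = to_index(end)
--     out = []
--     cur = to_letter(s)
--     for _ in range(s, e + 1):
--         out.append(cur)
--         cur = inc(cur)
--     return out
-- ===== Notes on version B (the rewrite author's own statement) =====
-- stated objective: alternative
-- what changed: Instead of decoding every index in the range via repeated divmod (A's to_letter per element), B decodes only the start column once and advances the current column string with an odometer-style carry increment ('Z'->'A' leftward, prepend 'A' on full carry); Pre_ excludes non-column garbage start strings whose bijective-base-26 index is negative while the range extends past it, where A's run of accidental empty strings and B's odometer progression are both unspecified corner behaviours.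
-- outside the precondition, e.g. on col_letter_range('?', ''): A returns ['', ''], B returns ['', 'A']
import Mathlib
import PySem

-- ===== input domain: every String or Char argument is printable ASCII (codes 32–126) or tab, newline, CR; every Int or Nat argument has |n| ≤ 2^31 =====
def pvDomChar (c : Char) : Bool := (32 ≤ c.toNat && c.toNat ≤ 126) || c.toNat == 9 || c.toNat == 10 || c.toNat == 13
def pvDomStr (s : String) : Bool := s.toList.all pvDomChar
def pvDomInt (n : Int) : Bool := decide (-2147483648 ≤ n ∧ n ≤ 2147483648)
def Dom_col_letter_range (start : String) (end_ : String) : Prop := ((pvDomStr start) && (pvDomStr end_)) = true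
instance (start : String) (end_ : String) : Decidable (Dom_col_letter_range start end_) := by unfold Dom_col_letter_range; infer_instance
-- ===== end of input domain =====

-- B replaces A's per-index divmod decoding with an odometer: it decodes the start column
-- once and advances the current string by a carry-style increment (objective: alternative).

-- ===== PORT A =====
-- helper to_index: res = res*26 + (ord(ch) - 64) over the characters
def pvToIndex (col : String) : Int :=
  col.toList.foldl (fun res ch => res * 26 + ((ch.toNat : Int) - 64)) 0

-- helper to_letter's while-loop: state (idx, out); out = chr(65+rem) + out
def pvToLetterLoop (idx : Int) (out : List Char) : List Char :=
  if h : idx > 0 then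
    pvToLetterLoop (PySem.Int.floordiv (idx - 1) 26)
      (Char.ofNat ((65 + PySem.Int.mod (idx - 1) 26).toNat) :: out)
  else out
termination_by idx.toNat
decreasing_by
  rw [PySem.Int.floordiv_eq_ediv_of_pos (by omega : (0:Int) < 26)]
  have h1 : (0:Int) ≤ (idx - 1) / 26 := Int.ediv_nonneg (by omega) (by omega)
  have h2 : (idx - 1) / 26 ≤ idx - 1 := Int.ediv_le_self _ (by omega)
  omega

def pvToLetter (idx : Int) : List Char := pvToLetterLoop idx []

def col_letter_range (start : String) (end_ : String) : List String :=
  (PySem.List.pyRange (pvToIndex start) (pvToIndex end_ + 1) 1).map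
    (fun i => String.mk (pvToLetter i))

-- ===== PORT B =====
-- to_index: sum((ord(ch)-64) * 26**i for i, ch in enumerate(reversed(col)));
-- enumerate indices are nonnegative, so '.toNat' on the exponent is exact
def pvToIndexB (col : String) : Int :=
  (PySem.List.enumerate col.toList.reverse 0).foldl
    (fun acc p => acc + ((p.2.toNat : Int) - 64) * 26 ^ p.1.toNat) 0

-- to_letter, recursively: '' for idx <= 0, else to_letter((idx-1)//26) + chr(65+(idx-1)%26)
def pvToLetterB (idx : Int) : List Char :=
  if _h : idx ≤ 0 then []
  else
    pvToLetterB (PySem.Int.floordiv (idx - 1) 26) ++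
      [Char.ofNat ((65 + PySem.Int.mod (idx - 1) 26).toNat)]
termination_by idx.toNat
decreasing_by
  rw [PySem.Int.floordiv_eq_ediv_of_pos (by omega : (0:Int) < 26)]
  have h1 : (0:Int) ≤ (idx - 1) / 26 := Int.ediv_nonneg (by omega) (by omega)
  have h2 : (idx - 1) / 26 ≤ idx - 1 := Int.ediv_le_self _ (by omega)
  omega

-- inc's while-loop walks the string from its END: recursion over the reversed char list
def pvIncRev : List Char → List Char
  | [] => ['A']                                   -- every position carried: prepend 'A'
  | c :: rest =>
      if c = 'Z' then 'A' :: pvIncRev rest        -- 'Z' -> 'A', carry left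
      else Char.ofNat (c.toNat + 1) :: rest       -- bump this position, done

def pvInc (col : List Char) : List Char := (pvIncRev col.reverse).reverse

def col_letter_range_alt (start : String) (end_ : String) : List String :=
  let s := pvToIndexB start
  let e := pvToIndexB end_
  ((PySem.List.pyRange s (e + 1) 1).foldl
      (fun (p : List String × List Char) _ => (p.1 ++ [String.mk p.2], pvInc p.2))
      ([], pvToLetterB s)).1

-- ===== PRECONDITION & SPEC =====
-- Pre_ excludes non-column garbage start strings whose bijective-base-26 index is negative
-- while the range extends past it: there A's run of accidental empty strings and B's odometer
-- progression are both unspecified corner behaviours.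
def pvColIndex (col : String) : Int :=
  col.toList.foldl (fun res ch => res * 26 + ((ch.toNat : Int) - 64)) 0

def Pre_col_letter_range (start : String) (end_ : String) : Prop :=
  0 ≤ pvColIndex start ∨ pvColIndex end_ ≤ pvColIndex start
instance (start : String) (end_ : String) : Decidable (Pre_col_letter_range start end_) := by unfold Pre_col_letter_range; infer_instance

def pvWitness_col_letter_range : String × String := ("A", "C")

def Spec_col_letter_range (start : String) (end_ : String) (out : List String) : Prop := out = col_letter_range_alt start end_
instance (start : String) (end_ : String) (out : List String) : Decidable (Spec_col_letter_range start end_ out) := by unfold Spec_col_letter_range; infer_instance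

-- ===== CLAIM (what is proved, stated in full; the proofs are below) =====
def Claim_equal_col_letter_range : Prop := ∀ (start : String) (end_ : String), Dom_col_letter_range start end_ → Pre_col_letter_range start end_ → Spec_col_letter_range start end_ (col_letter_range start end_)

-- ===== LEMMAS AND PROOFS =====

theorem pvColIndex_eq (col : String) : pvColIndex col = pvToIndex col := rfl

-- Horner's rule: running A's fold from a is running it from 0 plus a * 26^length
theorem pvHorner (l : List Char) : ∀ a : Int,
    l.foldl (fun res ch => res * 26 + ((ch.toNat : Int) - 64)) a
    = a * 26 ^ l.length + l.foldl (fun res ch => res * 26 + ((ch.toNat : Int) - 64)) 0 := by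
  induction l with
  | nil => intro a; simp
  | cons c t ih =>
    intro a
    simp only [List.foldl_cons, List.length_cons]
    rw [ih (a * 26 + ((c.toNat : Int) - 64)), ih (0 * 26 + ((c.toNat : Int) - 64))]
    ring

-- B's power sum over enumerate(reversed(col)) equals A's Horner fold
theorem pvToIndexB_list (l : List Char) :
    (PySem.List.enumerate l.reverse 0).foldl
      (fun acc p => acc + ((p.2.toNat : Int) - 64) * 26 ^ p.1.toNat) 0
    = l.foldl (fun res ch => res * 26 + ((ch.toNat : Int) - 64)) 0 := by
  induction l with
  | nil => simp
  | cons c t ih =>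
    simp only [List.reverse_cons, List.foldl_cons]
    rw [PySem.List.enumerate_append, List.foldl_append, ih]
    have hone : PySem.List.enumerate [c] (0 + (t.reverse.length : Int)) =
        [((t.length : Int), c)] := by
      simp [PySem.List.enumerate]
    rw [hone]
    simp only [List.foldl_cons, List.foldl_nil, Int.toNat_natCast]
    rw [pvHorner t (0 * 26 + ((c.toNat : Int) - 64))]
    ring

theorem pvToIndexB_eq (col : String) : pvToIndexB col = pvToIndex col := by
  rw [pvToIndexB, pvToIndex, pvToIndexB_list]

-- canonical bijective-base-26 letters of a nonnegative index, as a Nat recursion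
def pvLN : Nat → List Char
  | 0 => []
  | n + 1 => pvLN (n / 26) ++ [Char.ofNat (65 + n % 26)]
decreasing_by exact Nat.lt_succ_of_le (Nat.div_le_self n 26)

theorem pvLN_zero : pvLN 0 = [] := by rw [pvLN]

theorem pvLN_succ (n : Nat) : pvLN (n + 1) = pvLN (n / 26) ++ [Char.ofNat (65 + n % 26)] := by
  rw [pvLN]

theorem pvChar_toNat (n : Nat) (h : n < 55296) : (Char.ofNat n).toNat = n := by
  rw [Char.toNat_ofNat, if_pos (Or.inl h)]

theorem pvToLetterLoop_nat (n : Nat) : ∀ out, pvToLetterLoop (n : Int) out = pvLN n ++ out := by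
  induction n using Nat.strong_induction_on with
  | _ n ih =>
    intro out
    match n with
    | 0 => rw [pvToLetterLoop]; simp [pvLN_zero]
    | m + 1 =>
      rw [pvToLetterLoop]
      have hpos : ((m + 1 : Nat) : Int) > 0 := by push_cast; omega
      rw [dif_pos hpos]
      have hsub : ((m + 1 : Nat) : Int) - 1 = (m : Nat) := by push_cast; omega
      have hfd : PySem.Int.floordiv ((m : Nat) : Int) 26 = ((m / 26 : Nat) : Int) := by
        exact_mod_cast PySem.Int.floordiv_natCast m 26
      have hmd : PySem.Int.mod ((m : Nat) : Int) 26 = ((m % 26 : Nat) : Int) := by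
        exact_mod_cast PySem.Int.mod_natCast m 26
      rw [hsub, hfd, hmd]
      have htn : ((65 + ((m % 26 : Nat) : Int)).toNat) = 65 + m % 26 := by omega
      rw [htn, ih (m / 26) (Nat.lt_succ_of_le (Nat.div_le_self m 26))]
      rw [pvLN_succ m]; simp

theorem pvToLetter_nonpos (i : Int) (h : i ≤ 0) : pvToLetter i = [] := by
  rw [pvToLetter, pvToLetterLoop, dif_neg (by omega)]

theorem pvToLetterB_nat (n : Nat) : pvToLetterB (n : Int) = pvLN n := by
  induction n using Nat.strong_induction_on with
  | _ n ih =>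
    match n with
    | 0 => rw [pvToLetterB]; simp [pvLN_zero]
    | m + 1 =>
      rw [pvToLetterB]
      rw [dif_neg (by push_cast; omega)]
      have hsub : ((m + 1 : Nat) : Int) - 1 = (m : Nat) := by push_cast; omega
      have hfd : PySem.Int.floordiv ((m : Nat) : Int) 26 = ((m / 26 : Nat) : Int) := by
        exact_mod_cast PySem.Int.floordiv_natCast m 26
      have hmd : PySem.Int.mod ((m : Nat) : Int) 26 = ((m % 26 : Nat) : Int) := by
        exact_mod_cast PySem.Int.mod_natCast m 26
      rw [hsub, hfd, hmd]
      have htn : ((65 + ((m % 26 : Nat) : Int)).toNat) = 65 + m % 26 := by omega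
      rw [htn, ih (m / 26) (Nat.lt_succ_of_le (Nat.div_le_self m 26))]
      rw [pvLN_succ m]

theorem pvToLetter_nonneg (i : Int) (h : 0 ≤ i) : pvToLetter i = pvLN i.toNat := by
  have hi : i = (i.toNat : Int) := by omega
  have h2 : ((i.toNat : Int)).toNat = i.toNat := Int.toNat_natCast _
  rw [pvToLetter, hi, pvToLetterLoop_nat, List.append_nil, h2]

theorem pvToLetterB_eq (i : Int) : pvToLetterB i = pvToLetter i := by
  by_cases h : i ≤ 0
  · rw [pvToLetterB, dif_pos h, pvToLetter_nonpos i h]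
  · have hi : i = (i.toNat : Int) := by omega
    rw [hi, pvToLetterB_nat, pvToLetter_nonneg _ (by omega), Int.toNat_natCast]

-- the odometer increment realises successor on canonical letters
theorem pvInc_LN (n : Nat) : pvIncRev (pvLN n).reverse = (pvLN (n + 1)).reverse := by
  induction n using Nat.strong_induction_on with
  | _ n ih =>
    match n with
    | 0 =>
      rw [pvLN_zero, pvLN_succ 0]
      simp [pvIncRev, pvLN_zero]
    | m + 1 =>
      have hvalid : 65 + m % 26 < 55296 := by omega
      by_cases hz : m % 26 = 25
      · have h1 : (m + 1) % 26 = 0 := by omega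
        have h2 : (m + 1) / 26 = m / 26 + 1 := by omega
        rw [pvLN_succ (m + 1), h1, h2, pvLN_succ m]
        simp only [List.reverse_append, List.reverse_singleton, List.singleton_append]
        rw [pvIncRev]
        have hc : Char.ofNat (65 + m % 26) = 'Z' := by rw [hz]
        rw [if_pos hc, ih (m / 26) (Nat.lt_succ_of_le (Nat.div_le_self m 26))]
      · have h1 : (m + 1) % 26 = m % 26 + 1 := by omega
        have h2 : (m + 1) / 26 = m / 26 := by omega
        rw [pvLN_succ (m + 1), h1, h2, pvLN_succ m]
        simp only [List.reverse_append, List.reverse_singleton, List.singleton_append]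
        rw [pvIncRev]
        have hne : Char.ofNat (65 + m % 26) ≠ 'Z' := by
          intro hc
          have := congrArg Char.toNat hc
          rw [pvChar_toNat _ hvalid] at this
          simp [Char.toNat] at this
          omega
        rw [if_neg hne, pvChar_toNat _ hvalid]
        simp [Nat.add_assoc]

theorem pvInc_succ (n : Nat) : pvInc (pvLN n) = pvLN (n + 1) := by
  rw [pvInc, pvInc_LN, List.reverse_reverse]

-- the B fold, run from canonical state pvLN n, appends the next (length) letters
theorem pvFoldB (l : List Int) : ∀ (acc : List String) (n : Nat),
    (l.foldl (fun (p : List String × List Char) _ => (p.1 ++ [String.mk p.2], pvInc p.2))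
      (acc, pvLN n)).1
    = acc ++ (List.range l.length).map (fun j => String.mk (pvLN (n + j))) := by
  induction l with
  | nil => intro acc n; simp
  | cons x t ih =>
    intro acc n
    simp only [List.foldl_cons, pvInc_succ, ih, List.length_cons]
    rw [List.range_succ_eq_map]
    simp only [List.map_cons, List.map_map, Nat.add_zero, List.append_assoc,
      List.singleton_append]
    refine congrArg (fun z => acc ++ z) ?_
    refine congrArg₂ List.cons rfl ?_
    apply List.map_congr_left
    intro j _
    simp only [Function.comp_apply]
    have hj : n + 1 + j = n + (j + 1) := by omega
    simp [hj]

-- A's map over a nonnegative range, rewritten index by index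
theorem pvMapF_pos (a b : Int) (ha : 0 ≤ a) :
    (PySem.List.pyRange a b 1).map (fun i => String.mk (pvToLetter i))
    = (List.range ((b - a).toNat)).map (fun j => String.mk (pvLN (a.toNat + j))) := by
  rw [PySem.List.pyRange_one, List.map_map]
  apply List.map_congr_left
  intro j _
  simp only [Function.comp_apply]
  rw [pvToLetter_nonneg (a + j) (by omega)]
  congr 2
  omega

-- ===== VERDICT (by name: the statement is the Claim_ definition above) =====
theorem col_letter_range_spec : Claim_equal_col_letter_range := by
  intro start end_ _ hpre
  unfold Spec_col_letter_range
  simp only [col_letter_range, col_letter_range_alt, pvToIndexB_eq, pvToLetterB_eq]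
  rw [Pre_col_letter_range, pvColIndex_eq, pvColIndex_eq] at hpre
  set s := pvToIndex start with hs
  set e := pvToIndex end_ with he
  rcases hpre with h0 | hle
  · -- 0 ≤ s : the odometer fold tracks A's per-index decoding
    rw [pvToLetter_nonneg s h0, pvFoldB, List.nil_append,
      PySem.List.length_pyRange_one, pvMapF_pos s (e + 1) h0]
  · -- e ≤ s : the range has at most one element
    by_cases hse : s ≤ e
    · have hes : e = s := by omega
      rw [hes]
      have h1 : PySem.List.pyRange s (s + 1) 1 = [s] := by
        rw [PySem.List.pyRange_one]
        norm_num
      rw [h1]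
      simp
    · have hnil : PySem.List.pyRange s (e + 1) 1 = [] :=
        PySem.List.pyRange_one_eq_nil (by omega)
      rw [hnil]
      simp
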